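-- pv_equiv track=rewrite | github.com/ClarenceJiang71/fastprep_prac | TikTok/find_gcd.py | find_gcd_faster
-- ===== SOURCE A (Python) =====
-- def find_gcd_faster(arr):
--     # find the max num in the arr
--     max_num = max(arr)
--     # create a list of 0s with the length of max_num
--     count = [0] * (max_num + 1)
--     for num in arr:
--         count[num] += 1
--     # find the max gcd
--     for i in range(max_num, 0, -1):
--         # start with each potential value of max gcd
--         factor_count = 0
--         for j in range(i, max_num + 1, i):
--             # each j is a factor, and
--             # you check how many original numbers
--             # is some multiple of j, by keep
--             # increasing by i
--             factor_count += count[j]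
--             # if there is more than 1 number being a
--             # multiple of j, then j is a gcd
--             # and because start from max
--             # it's the max gcd.
--             if factor_count > 1:
--                 return i
--     return 1 # if no gcd found, return 1
-- ===== SOURCE B (Python) =====
-- def find_gcd_faster(arr):
--     # maximum pairwise gcd, scanned directly over all unordered pairs;
--     # only positive values can share a divisor d >= 1, so non-positive
--     # entries are skipped; 1 when fewer than two values remain
--     def gcd(a, b):
--         while b:
--             a, b = b, a % b
--         return a
--     vals = [v for v in arr if v > 0]
--     best = 1
--     while vals:
--         x = vals.pop(0)
--         for y in vals:
--             g = gcd(x, y)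
--             if g > best:
--                 best = g
--     return best
-- ===== Notes on version B (the rewrite author's own statement) =====
-- stated objective: simpler
-- what changed: Replaces A's counting-array divisor sieve (build count[0..max], then for each candidate i from max down count its multiples) by a direct scan over all unordered pairs of the positive elements taking the maximum Euclidean gcd, with 1 as default when fewer than two remain.
-- outside the precondition, e.g. on find_gcd_faster([3, -1]): A returns 3, B returns 1
-- crash fix: On empty arr A raises ValueError, and on arr containing an element below -(max+1) (in particular whenever max < 0) A raises IndexError from count[num]; B returns the maximum pairwise gcd of the positive elements (1 when fewer than two). — e.g. on find_gcd_faster([]): A raises ValueError, B returns 1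
import Mathlib
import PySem

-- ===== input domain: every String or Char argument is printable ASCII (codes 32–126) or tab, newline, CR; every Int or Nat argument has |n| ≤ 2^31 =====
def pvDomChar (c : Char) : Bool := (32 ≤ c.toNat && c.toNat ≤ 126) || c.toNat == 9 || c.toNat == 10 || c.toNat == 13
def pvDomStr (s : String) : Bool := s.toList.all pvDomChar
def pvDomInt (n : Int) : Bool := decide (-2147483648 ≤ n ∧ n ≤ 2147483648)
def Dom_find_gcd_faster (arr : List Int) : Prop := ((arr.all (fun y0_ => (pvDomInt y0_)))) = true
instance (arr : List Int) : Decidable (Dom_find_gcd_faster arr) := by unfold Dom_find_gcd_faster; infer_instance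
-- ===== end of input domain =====

-- B replaces A's divisor-counting sieve by a direct scan over all unordered pairs of
-- the positive elements (only they can share a divisor d ≥ 1 — exactly what A's sieve
-- counts), taking the maximum Euclidean gcd (objective: simpler; not faster).
-- Pre_ excludes the empty list (A raises ValueError) and lists containing a negative
-- element: there A raises IndexError when the magnitude exceeds max+1, and otherwise
-- Python's negative-index wraparound makes A silently count the negative as max+1+x,
-- an accident of the implementation (e.g. [3, -1]: A returns 3, B returns 1).


-- ===== PORT A =====
-- count[num] += 1 with Python index semantics (total pySetD/pyGetD forms; exact under
-- Pre_, which keeps every index in range)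
def pyIncAt (c : List Int) (num : Int) : List Int :=
  PySem.List.pySetD c num (PySem.List.pyGetD c num 0 + 1)

-- the inner 'for j in range(i, max_num + 1, i)' loop with its early 'return i'
def innerLoopA (count : List Int) (i : Int) : List Int → Int → Option Int
  | [], _ => none
  | j :: rest, fc =>
    let fc' := fc + PySem.List.pyGetD count j 0
    if fc' > 1 then some i else innerLoopA count i rest fc'

-- the outer 'for i in range(max_num, 0, -1)' loop; falls through to 'return 1'
def outerLoopA (count : List Int) (max_num : Int) : List Int → Int
  | [] => 1
  | i :: rest =>
    match innerLoopA count i (PySem.List.pyRange i (max_num + 1) i) 0 with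
    | some r => r
    | none => outerLoopA count max_num rest

def find_gcd_faster (arr : List Int) : Int :=
  match PySem.List.max? arr (fun x => x) with
  | none => 0   -- max([]) raises ValueError in Python; excluded by Pre_
  | some max_num =>
    let count := arr.foldl pyIncAt (List.replicate (max_num + 1).toNat (0 : Int))
    outerLoopA count max_num (PySem.List.pyRange max_num 0 (-1))

-- ===== PORT B =====
-- the hand-written 'while b: a, b = b, a % b' Euclid of Source B;
-- the fuel argument only makes the while-loop total (it never runs out: |b| strictly
-- decreases each iteration, so b.natAbs + 1 rounds always suffice)
def euclidGo : Nat → Int → Int → Int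
  | 0, a, _ => a
  | fuel + 1, a, b => if b = 0 then a else euclidGo fuel b (PySem.Int.mod a b)

def euclidB (a b : Int) : Int := euclidGo (b.natAbs + 1) a b

def gcdB (a b : Int) : Int := euclidB a b

-- 'for y in rest: g = gcd(x, y); if g > best: best = g'
def innerB (x : Int) (rest : List Int) (best : Int) : Int :=
  rest.foldl (fun bst y => let g := gcdB x y; if g > bst then g else bst) best

-- 'while rest: x = rest.pop(0); …'
def pairsLoopB : List Int → Int → Int
  | [], best => best
  | x :: rest, best => pairsLoopB rest (innerB x rest best)

-- 'vals = [v for v in arr if v > 0]' and then the pair scan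
def find_gcd_faster_alt (arr : List Int) : Int :=
  pairsLoopB (arr.filter (fun v => decide (0 < v))) 1

-- ===== PRECONDITION & SPEC =====
-- Pre_ excludes the empty list (A raises ValueError) and lists with a negative element
-- (A raises IndexError, or returns an accidental value via negative-index wraparound).
def Pre_find_gcd_faster (arr : List Int) : Prop := arr ≠ [] ∧ ∀ x ∈ arr, 0 ≤ x
instance (arr : List Int) : Decidable (Pre_find_gcd_faster arr) := by unfold Pre_find_gcd_faster; infer_instance
def pvWitness_find_gcd_faster : List Int := [4, 6, 8]

def Spec_find_gcd_faster (arr : List Int) (out : Int) : Prop := out = find_gcd_faster_alt arr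
instance (arr : List Int) (out : Int) : Decidable (Spec_find_gcd_faster arr out) := by unfold Spec_find_gcd_faster; infer_instance

-- On empty arr A raises ValueError, and on arr containing an element below -(max+1)
-- (in particular whenever max < 0) A raises IndexError; B returns the maximum pairwise
-- gcd of absolute values (1 when there are fewer than two elements).
def Raises_find_gcd_faster (arr : List Int) : Prop :=
  arr = [] ∨ ∃ y ∈ arr, y + arr.tail.foldl max (arr.headD 0) + 1 < 0
instance (arr : List Int) : Decidable (Raises_find_gcd_faster arr) := by unfold Raises_find_gcd_faster; infer_instance
def pvRaiseWitness_find_gcd_faster : List Int := []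
def pvRaiseWitnessOut_find_gcd_faster : Int := 1

-- ===== CLAIM (what is proved, stated in full; the proofs are below) =====
def Claim_equal_find_gcd_faster : Prop := ∀ (arr : List Int), Dom_find_gcd_faster arr → Pre_find_gcd_faster arr → Spec_find_gcd_faster arr (find_gcd_faster arr)
def Claim_raises_find_gcd_faster : Prop := (∀ (arr : List Int), Dom_find_gcd_faster arr → Raises_find_gcd_faster arr → ¬ Pre_find_gcd_faster arr) ∧ (Dom_find_gcd_faster (pvRaiseWitness_find_gcd_faster) ∧ Raises_find_gcd_faster (pvRaiseWitness_find_gcd_faster) ∧ find_gcd_faster_alt (pvRaiseWitness_find_gcd_faster) = pvRaiseWitnessOut_find_gcd_faster)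

-- ===== LEMMAS AND PROOFS =====

-- "at least two elements of arr are positive and divisible by i"
def pvP (arr : List Int) (i : Int) : Prop :=
  2 ≤ arr.countP (fun x => decide (1 ≤ x ∧ i ∣ x))

-- ---------- generic list facts ----------

theorem pv_two_of_countP {l : List Int} {p : Int → Bool} (h : 2 ≤ l.countP p) :
    ∃ x y, [x, y].Sublist l ∧ p x ∧ p y := by
  induction l with
  | nil => simp at h
  | cons a t ih =>
    rw [List.countP_cons] at h
    by_cases hpa : p a
    · rw [if_pos hpa] at h
      have h1 : 0 < t.countP p := by omega
      obtain ⟨y, hy, hpy⟩ := List.countP_pos_iff.mp h1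
      exact ⟨a, y, List.cons_sublist_cons.mpr (List.singleton_sublist.mpr hy), hpa, hpy⟩
    · rw [if_neg hpa, add_zero] at h
      obtain ⟨x, y, hs, hx, hy⟩ := ih h
      exact ⟨x, y, hs.trans (List.sublist_cons_self a t), hx, hy⟩

theorem pv_sum_ite (x : Int) (js : List Int) (hnd : js.Nodup) :
    (js.map (fun j => if x = j then (1 : Int) else 0)).sum
      = if x ∈ js then (1 : Int) else 0 := by
  induction js with
  | nil => simp
  | cons j t ih =>
    rcases List.nodup_cons.mp hnd with ⟨hj, hnd'⟩
    by_cases hxj : x = j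
    · subst hxj
      simp [List.map_cons, ih hnd', hj]
    · simp only [List.map_cons, List.sum_cons, if_neg hxj, ih hnd', zero_add,
        List.mem_cons]
      simp [hxj]

theorem pv_sum_count (l js : List Int) (hnd : js.Nodup) :
    (js.map (fun j => (l.count j : Int))).sum
      = (l.countP (fun x => decide (x ∈ js)) : Int) := by
  induction l with
  | nil => simp
  | cons a t ih =>
    have : (js.map (fun j => ((a :: t).count j : Int))).sum
        = (js.map (fun j => (t.count j : Int))).sum
          + (js.map (fun j => if a = j then (1 : Int) else 0)).sum := by
      rw [← List.sum_map_add]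
      congr 1
      refine List.map_congr_left (fun j _ => ?_)
      rw [List.count_cons]
      by_cases h : a = j <;> simp [h]
    rw [this, ih, pv_sum_ite a js hnd, List.countP_cons]
    by_cases h : a ∈ js <;> simp [h]

-- ---------- the count array ----------

theorem pv_length_foldl_inc (l : List Int) (c : List Int) :
    (l.foldl pyIncAt c).length = c.length := by
  induction l generalizing c with
  | nil => rfl
  | cons x t ih => rw [List.foldl_cons, ih, pyIncAt, PySem.List.length_pySetD]

theorem pv_getD_foldl_inc (l : List Int) (c : List Int)
    (hb : ∀ x ∈ l, 0 ≤ x ∧ x < (c.length : Int)) (j : Nat) (hj : j < c.length) :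
    (l.foldl pyIncAt c).getD j 0 = c.getD j 0 + (l.count (j : Int) : Int) := by
  induction l generalizing c with
  | nil => simp
  | cons x t ih =>
    have hx := hb x (List.mem_cons_self ..)
    have hlen : (pyIncAt c x).length = c.length := by
      rw [pyIncAt, PySem.List.length_pySetD]
    rw [List.foldl_cons, ih (pyIncAt c x)
      (by intro z hz; rw [hlen]; exact hb z (List.mem_cons_of_mem _ hz))
      (by omega)]
    have hxt : x.toNat < c.length := by omega
    have hset : pyIncAt c x = c.set x.toNat (c.getD x.toNat 0 + 1) := by
      rw [pyIncAt, PySem.List.pySetD_of_nonneg c _ hx.1,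
        PySem.List.pyGetD_eq_getElem c 0 hx.1 hx.2, ← List.getD_eq_getElem c 0 hxt]
    rw [hset]
    have hget : (c.set x.toNat (c.getD x.toNat 0 + 1)).getD j 0
        = c.getD j 0 + (if x.toNat = j then 1 else 0) := by
      rw [List.getD_eq_getElem _ 0 (by simpa using hj), List.getElem_set,
          List.getD_eq_getElem c 0 hj]
      by_cases hxj : x.toNat = j
      · rw [if_pos hxj, if_pos hxj, hxj, ← List.getD_eq_getElem c 0 hj]
      · rw [if_neg hxj, if_neg hxj, add_zero]
    rw [hget, List.count_cons]
    by_cases hxj : x = (j : Int)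
    · rw [if_pos (by omega), if_pos (by simp [hxj])]
      push_cast
      ring
    · rw [if_neg (by omega), if_neg (by simp only [beq_iff_eq]; omega)]
      push_cast
      ring

-- ---------- the inner loop ----------

theorem pv_innerA_eq (count : List Int) (i : Int) (js : List Int) (fc : Int)
    (hfc : fc ≤ 1) (hnn : ∀ j ∈ js, 0 ≤ PySem.List.pyGetD count j 0) :
    innerLoopA count i js fc
      = if 2 ≤ fc + (js.map (fun j => PySem.List.pyGetD count j 0)).sum
        then some i else none := by
  induction js generalizing fc with
  | nil => simp [innerLoopA]; omega
  | cons j rest ih =>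
    have hj := hnn j (List.mem_cons_self ..)
    have hsum : 0 ≤ (rest.map (fun j => PySem.List.pyGetD count j 0)).sum :=
      List.sum_nonneg (by
        intro z hz
        obtain ⟨w, hw, rfl⟩ := List.mem_map.mp hz
        exact hnn w (List.mem_cons_of_mem _ hw))
    rw [innerLoopA]
    by_cases hbig : fc + PySem.List.pyGetD count j 0 > 1
    · rw [if_pos hbig, List.map_cons, List.sum_cons]
      rw [if_pos (by omega)]
    · rw [if_neg hbig, ih _ (by omega)
        (fun z hz => hnn z (List.mem_cons_of_mem _ hz)),
        List.map_cons, List.sum_cons]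
      congr 1
      simp only [eq_iff_iff]
      omega

-- ---------- the outer loop ----------

theorem pv_outer_one_or_mem (count : List Int) (m : Int) (is : List Int)
    (Q : Int → Prop)
    (hf : ∀ i ∈ is, innerLoopA count i (PySem.List.pyRange i (m + 1) i) 0
        = if 2 ≤ (0 : Int) + ((PySem.List.pyRange i (m + 1) i).map
            (fun j => PySem.List.pyGetD count j 0)).sum then some i else none)
    (hq : ∀ i ∈ is, (2 ≤ (0 : Int) + ((PySem.List.pyRange i (m + 1) i).map
            (fun j => PySem.List.pyGetD count j 0)).sum) ↔ Q i) :
    outerLoopA count m is = 1 ∨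
      (outerLoopA count m is ∈ is ∧ Q (outerLoopA count m is)) := by
  induction is with
  | nil => left; rfl
  | cons i rest ih =>
    rw [outerLoopA, hf i (List.mem_cons_self ..)]
    by_cases hc : 2 ≤ (0 : Int) + ((PySem.List.pyRange i (m + 1) i).map
        (fun j => PySem.List.pyGetD count j 0)).sum
    · rw [if_pos hc]
      right
      exact ⟨List.mem_cons_self .., (hq i (List.mem_cons_self ..)).mp hc⟩
    · rw [if_neg hc]
      rcases ih (fun z hz => hf z (List.mem_cons_of_mem _ hz))
          (fun z hz => hq z (List.mem_cons_of_mem _ hz)) with h | ⟨h1, h2⟩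
      · exact Or.inl h
      · exact Or.inr ⟨List.mem_cons_of_mem _ h1, h2⟩

theorem pv_outer_is_max (count : List Int) (m : Int) (is : List Int)
    (Q : Int → Prop)
    (hf : ∀ i ∈ is, innerLoopA count i (PySem.List.pyRange i (m + 1) i) 0
        = if 2 ≤ (0 : Int) + ((PySem.List.pyRange i (m + 1) i).map
            (fun j => PySem.List.pyGetD count j 0)).sum then some i else none)
    (hq : ∀ i ∈ is, (2 ≤ (0 : Int) + ((PySem.List.pyRange i (m + 1) i).map
            (fun j => PySem.List.pyGetD count j 0)).sum) ↔ Q i)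
    (hdesc : is.Pairwise (· > ·)) :
    ∀ i ∈ is, Q i → i ≤ outerLoopA count m is := by
  induction is with
  | nil => intro i h; simp at h
  | cons i rest ih =>
    intro z hz hQz
    rcases List.pairwise_cons.mp hdesc with ⟨hgt, hdesc'⟩
    rw [outerLoopA, hf i (List.mem_cons_self ..)]
    by_cases hc : 2 ≤ (0 : Int) + ((PySem.List.pyRange i (m + 1) i).map
        (fun j => PySem.List.pyGetD count j 0)).sum
    · rw [if_pos hc]
      rcases List.mem_cons.mp hz with rfl | hz'
      · exact le_refl _
      · exact le_of_lt (hgt z hz')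
    · rw [if_neg hc]
      rcases List.mem_cons.mp hz with rfl | hz'
      · exact absurd ((hq z (List.mem_cons_self ..)).mpr hQz) hc
      · exact ih (fun w hw => hf w (List.mem_cons_of_mem _ hw))
          (fun w hw => hq w (List.mem_cons_of_mem _ hw)) hdesc' z hz' hQz

-- ---------- characterisation of A ----------

theorem pv_A_char (arr : List Int) (hne : arr ≠ []) (hnn : ∀ x ∈ arr, 0 ≤ x) :
    (1 ≤ find_gcd_faster arr) ∧
    (find_gcd_faster arr = 1 ∨
      (1 ≤ find_gcd_faster arr ∧ find_gcd_faster arr ≤ arr.foldl max 0 ∧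
        pvP arr (find_gcd_faster arr))) ∧
    (∀ i : Int, 1 ≤ i → i ≤ arr.foldl max 0 → pvP arr i → i ≤ find_gcd_faster arr) := by
  -- the maximum
  obtain ⟨m, hmax⟩ : ∃ m, PySem.List.max? arr (fun x => x) = some m := by
    cases h : PySem.List.max? arr (fun x => x) with
    | none => exact absurd ((PySem.List.max?_eq_none_iff arr _).mp h) hne
    | some m => exact ⟨m, rfl⟩
  have hmmem : m ∈ arr := PySem.List.max?_mem hmax
  have hmub : ∀ y ∈ arr, y ≤ m := PySem.List.max?_isMax hmax
  have hm0 : 0 ≤ m := hnn m hmmem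
  have hMfold : arr.foldl max 0 = m := by
    have h1 := (PySem.List.le_foldl_max arr 0).1
    have h2 := (PySem.List.le_foldl_max arr 0).2 m hmmem
    rcases PySem.List.foldl_max_mem arr 0 with h3 | h3
    · omega
    · have := hmub _ h3; omega
  -- the count array
  set c := arr.foldl pyIncAt (List.replicate (m + 1).toNat (0 : Int)) with hc
  have hclen : c.length = (m + 1).toNat := by
    rw [hc, pv_length_foldl_inc, List.length_replicate]
  have hpg : ∀ j : Int, 0 ≤ j → j ≤ m → PySem.List.pyGetD c j 0 = (arr.count j : Int) := by
    intro j hj0 hjm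
    have hjlen : j < (c.length : Int) := by rw [hclen]; omega
    rw [PySem.List.pyGetD_eq_getElem c 0 hj0 hjlen,
      ← List.getD_eq_getElem c 0 (by omega)]
    rw [hc, pv_getD_foldl_inc arr _
      (by
        intro x hx
        have := hnn x hx
        have := hmub x hx
        rw [List.length_replicate]
        omega)
      j.toNat (by simp only [List.length_replicate]; omega)]
    rw [List.getD_replicate _ (by omega)]
    simp [Int.toNat_of_nonneg hj0]
  have hA : find_gcd_faster arr = outerLoopA c m (PySem.List.pyRange m 0 (-1)) := by
    simp only [find_gcd_faster, hmax, hc]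
  -- characterising the inner loop for each i in the countdown list
  have hmemdesc : ∀ i : Int, i ∈ PySem.List.pyRange m 0 (-1) ↔ 0 < i ∧ i ≤ m := by
    intro i; rw [PySem.List.mem_pyRange_neg_one]
  have hf : ∀ i ∈ PySem.List.pyRange m 0 (-1),
      innerLoopA c i (PySem.List.pyRange i (m + 1) i) 0
        = if 2 ≤ (0 : Int) + ((PySem.List.pyRange i (m + 1) i).map
            (fun j => PySem.List.pyGetD c j 0)).sum then some i else none := by
    intro i hi
    rcases (hmemdesc i).mp hi with ⟨hi0, him⟩
    apply pv_innerA_eq c i _ 0 (by omega)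
    intro j hj
    rcases (PySem.List.mem_pyRange_iff_of_pos hi0 j).mp hj with ⟨hj1, hj2, _⟩
    rw [hpg j (by omega) (by omega)]
    positivity
  have hq : ∀ i ∈ PySem.List.pyRange m 0 (-1),
      (2 ≤ (0 : Int) + ((PySem.List.pyRange i (m + 1) i).map
          (fun j => PySem.List.pyGetD c j 0)).sum) ↔ pvP arr i := by
    intro i hi
    rcases (hmemdesc i).mp hi with ⟨hi0, him⟩
    have hnd : (PySem.List.pyRange i (m + 1) i).Nodup := by
      rw [PySem.List.pyRange_of_pos _ _ hi0]
      refine (List.nodup_range).map ?_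
      intro k1 k2 hk
      simp only at hk
      have : (k1 : Int) = (k2 : Int) := by
        have hne' : i ≠ 0 := by omega
        have := mul_left_cancel₀ hne' (by omega : i * (k1 : Int) = i * (k2 : Int))
        exact this
      exact_mod_cast this
    have hsum1 : ((PySem.List.pyRange i (m + 1) i).map
        (fun j => PySem.List.pyGetD c j 0)).sum
        = ((PySem.List.pyRange i (m + 1) i).map (fun j => (arr.count j : Int))).sum := by
      congr 1
      refine List.map_congr_left (fun j hj => ?_)
      rcases (PySem.List.mem_pyRange_iff_of_pos hi0 j).mp hj with ⟨hj1, hj2, _⟩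
      exact hpg j (by omega) (by omega)
    have hsum2 := pv_sum_count arr (PySem.List.pyRange i (m + 1) i) hnd
    have hcp : arr.countP (fun x => decide (x ∈ PySem.List.pyRange i (m + 1) i))
        = arr.countP (fun x => decide (1 ≤ x ∧ i ∣ x)) := by
      refine List.countP_congr (fun x hx => ?_)
      have hx0 := hnn x hx
      have hxm := hmub x hx
      simp only [decide_eq_true_eq]
      rw [PySem.List.mem_pyRange_iff_of_pos hi0]
      constructor
      · rintro ⟨h1, h2, h3⟩
        refine ⟨by omega, ?_⟩
        have h4 := dvd_add h3 (dvd_refl i)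
        simpa using h4
      · rintro ⟨h1, h2⟩
        refine ⟨Int.le_of_dvd (by omega) h2, by omega, dvd_sub h2 dvd_rfl⟩
    rw [hsum1, hsum2, hcp]
    unfold pvP
    omega
  have hdesc : (PySem.List.pyRange m 0 (-1)).Pairwise (· > ·) := by
    rw [PySem.List.pyRange_neg_one_eq_reverse]
    rw [List.pairwise_reverse]
    exact PySem.List.pairwise_lt_pyRange_one _ _
  have hone := pv_outer_one_or_mem c m (PySem.List.pyRange m 0 (-1)) (pvP arr) hf hq
  have hmaxl := pv_outer_is_max c m (PySem.List.pyRange m 0 (-1)) (pvP arr) hf hq hdesc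
  rw [hA, hMfold]
  refine ⟨?_, ?_, ?_⟩
  · rcases hone with h | ⟨h1, _⟩
    · omega
    · have := (hmemdesc _).mp h1; omega
  · rcases hone with h | ⟨h1, h2⟩
    · left; exact h
    · right
      have := (hmemdesc _).mp h1
      exact ⟨by omega, by omega, h2⟩
  · intro i hi1 him hP
    exact hmaxl i ((hmemdesc i).mpr ⟨by omega, him⟩) hP

-- ---------- characterisation of B ----------

theorem pv_euclidGo_eq : ∀ (fuel : Nat) (a b : Int), 0 ≤ a → 0 ≤ b → b.natAbs < fuel →
    euclidGo fuel a b = (Int.gcd a b : Int) := by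
  intro fuel
  induction fuel with
  | zero => intro a b _ _ h; omega
  | succ f ih =>
    intro a b ha hb hf
    rw [euclidGo]
    by_cases h : b = 0
    · rw [if_pos h, h, Int.gcd_zero_right]
      omega
    · rw [if_neg h]
      have hbpos : 0 < b := lt_of_le_of_ne hb (Ne.symm h)
      rw [PySem.Int.mod_eq_emod_of_pos hbpos]
      rw [ih b (a % b) hb (Int.emod_nonneg a (by omega))
        (by have := Int.emod_lt_of_pos a hbpos; have := Int.emod_nonneg a (show b ≠ 0 from h); omega)]
      congr 1
      rw [Int.emod_def, mul_comm]
      exact (Int.gcd_sub_mul_right_right b a (a/b)).trans (Int.gcd_comm b a)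

theorem pv_gcdB_eq (a b : Int) (ha : 0 ≤ a) (hb : 0 ≤ b) :
    gcdB a b = (Int.gcd a b : Int) := by
  rw [gcdB, euclidB, pv_euclidGo_eq _ _ _ ha hb (by omega)]

theorem pv_innerB_eq (x : Int) (rest : List Int) (best : Int) :
    innerB x rest best = rest.foldl (fun bst y => max bst (gcdB x y)) best := by
  unfold innerB
  congr 1
  funext bst y
  dsimp only
  by_cases h : gcdB x y > bst
  · rw [if_pos h, max_eq_right (le_of_lt h)]
  · rw [if_neg h, max_eq_left (by omega)]

theorem pv_pairs_ge_best : ∀ (l : List Int) (best : Int), best ≤ pairsLoopB l best := by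
  intro l
  induction l with
  | nil => intro best; exact le_refl _
  | cons x rest ih =>
    intro best
    calc best ≤ innerB x rest best := by
          rw [pv_innerB_eq]; exact (PySem.List.le_foldl_max_int rest _ best).1
      _ ≤ pairsLoopB (x :: rest) best := ih _

theorem pv_pairs_ge : ∀ (l : List Int) (best x y : Int), [x, y].Sublist l →
    gcdB x y ≤ pairsLoopB l best := by
  intro l
  induction l with
  | nil => intro best x y hs; simp at hs
  | cons a t ih =>
    intro best x y hs
    rcases List.sublist_cons_iff.mp hs with hs' | ⟨r, heq, hr⟩
    · exact ih _ x y hs'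
    · obtain ⟨h1, h2⟩ := List.cons_eq_cons.mp heq
      subst h1
      subst h2
      have hy : y ∈ t := List.singleton_sublist.mp hr
      calc gcdB x y ≤ innerB x t best := by
            rw [pv_innerB_eq]; exact (PySem.List.le_foldl_max_int t _ best).2 y hy
        _ ≤ pairsLoopB t (innerB x t best) := pv_pairs_ge_best t _
        _ = pairsLoopB (x :: t) best := rfl

theorem pv_innerB_cases (x : Int) : ∀ (rest : List Int) (best : Int),
    innerB x rest best = best ∨ ∃ y ∈ rest, innerB x rest best = gcdB x y := by
  intro rest
  induction rest with
  | nil => intro best; left; rfl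
  | cons y t ih =>
    intro best
    have hstep : innerB x (y :: t) best
        = innerB x t (if gcdB x y > best then gcdB x y else best) := rfl
    rw [hstep]
    rcases ih (if gcdB x y > best then gcdB x y else best) with h | ⟨z, hz, h⟩
    · rw [h]
      by_cases hc : gcdB x y > best
      · right; exact ⟨y, List.mem_cons_self .., by rw [if_pos hc]⟩
      · left; rw [if_neg hc]
    · right; exact ⟨z, List.mem_cons_of_mem _ hz, h⟩

theorem pv_pairs_le : ∀ (l : List Int) (best : Int),
    pairsLoopB l best = best ∨ ∃ x y, [x, y].Sublist l ∧ pairsLoopB l best = gcdB x y := by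
  intro l
  induction l with
  | nil => intro best; left; rfl
  | cons a t ih =>
    intro best
    have hstep : pairsLoopB (a :: t) best = pairsLoopB t (innerB a t best) := rfl
    rw [hstep]
    rcases ih (innerB a t best) with h | ⟨x, y, hs, h⟩
    · rw [h]
      rcases pv_innerB_cases a t best with h' | ⟨y, hy, h'⟩
      · left; exact h'
      · right
        exact ⟨a, y, List.cons_sublist_cons.mpr (List.singleton_sublist.mpr hy), h'⟩
    · right
      exact ⟨x, y, hs.trans (List.sublist_cons_self a t), h⟩

-- ===== VERDICT (by name: the statement is the Claim_ definition above) =====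
theorem find_gcd_faster_spec : Claim_equal_find_gcd_faster := by
  unfold Claim_equal_find_gcd_faster
  intro arr _ hpre
  rcases hpre with ⟨hne, hnn⟩
  obtain ⟨h1, h2, h3⟩ := pv_A_char arr hne hnn
  have hMub := (PySem.List.le_foldl_max arr 0).2
  show find_gcd_faster arr = find_gcd_faster_alt arr
  have hBdef : find_gcd_faster_alt arr
      = pairsLoopB (arr.filter (fun v => decide (0 < v))) 1 := rfl
  have hposmem : ∀ z ∈ arr.filter (fun v => decide (0 < v)), z ∈ arr ∧ 0 < z := by
    intro z hz
    rcases List.mem_filter.mp hz with ⟨hz1, hz2⟩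
    exact ⟨hz1, by simpa using hz2⟩
  apply le_antisymm
  · rcases h2 with hA1 | ⟨hA1, hAM, hP⟩
    · rw [hA1, hBdef]; exact pv_pairs_ge_best _ 1
    · have hPpos : 2 ≤ (arr.filter (fun v => decide (0 < v))).countP
          (fun z => decide (1 ≤ z ∧ find_gcd_faster arr ∣ z)) := by
        unfold pvP at hP
        rw [List.countP_filter]
        calc 2 ≤ arr.countP (fun z => decide (1 ≤ z ∧ find_gcd_faster arr ∣ z)) := hP
          _ = _ := List.countP_congr (by
              intro z _
              simp only [Bool.and_eq_true, decide_eq_true_eq]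
              constructor
              · intro h; exact ⟨h, by omega⟩
              · intro h; exact h.1)
      obtain ⟨x, y, hs, hx, hy⟩ := pv_two_of_countP hPpos
      simp only [decide_eq_true_eq] at hx hy
      obtain ⟨hxm, hxp⟩ := hposmem x (hs.subset (by simp))
      obtain ⟨hym, hyp⟩ := hposmem y (hs.subset (by simp))
      have hle : find_gcd_faster arr ≤ gcdB x y := by
        rw [pv_gcdB_eq x y (by omega) (by omega)]
        have hdvd1 : ((find_gcd_faster arr).toNat : Int) ∣ x := by
          rw [Int.toNat_of_nonneg (by omega)]; exact hx.2
        have hdvd2 : ((find_gcd_faster arr).toNat : Int) ∣ y := by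
          rw [Int.toNat_of_nonneg (by omega)]; exact hy.2
        have hdvd := Int.dvd_gcd hdvd1 hdvd2
        have hgpos : 0 < Int.gcd x y := by
          rcases Nat.eq_zero_or_pos (Int.gcd x y) with h | h
          · rcases Int.gcd_eq_zero_iff.mp h with ⟨h', _⟩; omega
          · exact h
        have := Nat.le_of_dvd hgpos hdvd
        omega
      exact hle.trans (hBdef ▸ pv_pairs_ge _ 1 x y hs)
  · rw [hBdef]
    rcases pv_pairs_le (arr.filter (fun v => decide (0 < v))) 1 with hB1 | ⟨x, y, hs, hBg⟩
    · rw [hB1]; exact h1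
    · rw [hBg]
      obtain ⟨hxm, hxp⟩ := hposmem x (hs.subset (by simp))
      obtain ⟨hym, hyp⟩ := hposmem y (hs.subset (by simp))
      rw [pv_gcdB_eq x y (by omega) (by omega)]
      have hgd1 := Int.gcd_dvd_left x y
      have hgd2 := Int.gcd_dvd_right x y
      have hgpos : 0 < Int.gcd x y := by
        rcases Nat.eq_zero_or_pos (Int.gcd x y) with h | h
        · rcases Int.gcd_eq_zero_iff.mp h with ⟨h', _⟩; omega
        · exact h
      have hgle : (Int.gcd x y : Int) ≤ arr.foldl max 0 :=
        le_trans (Int.le_of_dvd (by omega) hgd1) (hMub x hxm)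
      have hpv : pvP arr (Int.gcd x y) := by
        unfold pvP
        calc 2 = List.countP
              (fun z => decide (1 ≤ z ∧ (Int.gcd x y : Int) ∣ z)) [x, y] := by
              simp [hgd1, hgd2, show (1 : Int) ≤ x from hxp,
                show (1 : Int) ≤ y from hyp]
          _ ≤ (arr.filter (fun v => decide (0 < v))).countP
              (fun z => decide (1 ≤ z ∧ (Int.gcd x y : Int) ∣ z)) := hs.countP_le
          _ = arr.countP (fun z =>
                decide (1 ≤ z ∧ (Int.gcd x y : Int) ∣ z) && decide (0 < z)) :=
              List.countP_filter ..
          _ ≤ arr.countP (fun z => decide (1 ≤ z ∧ (Int.gcd x y : Int) ∣ z)) :=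
              List.countP_mono_left (by intro w _ hw; simp_all)
      exact h3 _ (by exact_mod_cast hgpos) hgle hpv

@[simp]
theorem find_gcd_faster_raises : Claim_raises_find_gcd_faster := by
  unfold Claim_raises_find_gcd_faster
  constructor
  · rintro arr _ hr ⟨hne, hnn⟩
    match arr, hr with
    | [], _ => exact hne rfl
    | x :: t, hr =>
      rcases hr with h | ⟨y, hy, hlt⟩
      · exact hne h
      · have hx : 0 ≤ x := hnn x (List.mem_cons_self ..)
        have hy0 : 0 ≤ y := hnn y hy
        have hm := (PySem.List.le_foldl_max t x).1
        simp only [List.tail_cons, List.headD_cons] at hlt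
        omega
  · exact ⟨by decide, by decide, by decide⟩
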